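-- pv_equiv track=rewrite | github.com/patrick1011/py_algorithms | elements/baseAtoB.py | base1to2
-- ===== SOURCE A (Python) =====
-- def base1to2(_str, b1, b2):
--     out = 0
--     for i, val in enumerate(_str):
--         out = out * 10
--         if ord('0') <= ord(val) <= ord('9'):
--             out += (ord(val) - ord('0'))
--         else:
--             out += 10 + (ord(val) - ord('A') + 1)
--     return out
-- ===== SOURCE B (Python) =====
-- def base1to2(_str, b1, b2):
--     def value(c):
--         return ord(c) - ord('0') if '0' <= c <= '9' else 11 + ord(c) - ord('A')
--
--     def conv(s):
--         if len(s) <= 1: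
--             return value(s) if s else 0
--         m = len(s) // 2
--         return conv(s[:m]) * 10 ** (len(s) - m) + conv(s[m:])
--
--     return conv(_str)
-- ===== Notes on version B (the rewrite author's own statement) =====
-- stated objective: faster
-- what changed: Replaces A's left-to-right Horner loop (out = out*10 + digit, quadratic big-int cost) with a divide-and-conquer conversion: split the string in half, convert each half recursively and combine as left*10^len(right)+right, which exploits subquadratic big-int multiplication.
import Mathlib
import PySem

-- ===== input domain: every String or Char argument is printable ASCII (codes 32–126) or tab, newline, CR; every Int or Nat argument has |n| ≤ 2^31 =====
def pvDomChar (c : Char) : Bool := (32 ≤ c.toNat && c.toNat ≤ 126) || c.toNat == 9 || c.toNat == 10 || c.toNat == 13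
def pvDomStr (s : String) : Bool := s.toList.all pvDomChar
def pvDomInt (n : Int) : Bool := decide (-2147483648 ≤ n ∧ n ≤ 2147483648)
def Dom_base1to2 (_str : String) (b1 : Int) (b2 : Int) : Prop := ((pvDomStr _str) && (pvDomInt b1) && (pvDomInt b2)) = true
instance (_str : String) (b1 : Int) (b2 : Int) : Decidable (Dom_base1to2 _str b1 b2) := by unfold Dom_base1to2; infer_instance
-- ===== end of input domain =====

-- B replaces A's left-to-right Horner loop with a divide-and-conquer conversion
-- (convert each half, combine as left*10^len(right)+right); measurably faster on long strings.

-- ===== PORT A =====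
-- Horner loop: out = out*10; then add (ord(val)-48) for digits, else 10 + (ord(val)-65+1).
def base1to2 (_str : String) (b1 : Int) (b2 : Int) : Int :=
  _str.toList.foldl (fun out val =>
    let out := out * 10
    if 48 ≤ (val.toNat : Int) ∧ (val.toNat : Int) ≤ 57 then
      out + ((val.toNat : Int) - 48)
    else
      out + (10 + ((val.toNat : Int) - 65 + 1))) 0

-- ===== PORT B =====
-- value(c): digit value, else 11 + ord(c) - ord('A')
def pvValue (c : Char) : Int :=
  if 48 ≤ (c.toNat : Int) ∧ (c.toNat : Int) ≤ 57 then (c.toNat : Int) - 48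
  else 11 + (c.toNat : Int) - 65

-- conv(s): base case len(s) <= 1; otherwise split at m = len // 2 and combine
def pvConv (s : List Char) : Int :=
  if h : s.length ≤ 1 then
    match s with
    | [] => 0
    | c :: _ => pvValue c
  else
    pvConv (s.take (s.length / 2)) * 10 ^ (s.length - s.length / 2) +
      pvConv (s.drop (s.length / 2))
termination_by s.length
decreasing_by
  · simp only [List.length_take]; omega
  · simp only [List.length_drop]; omega

def base1to2_alt (_str : String) (b1 : Int) (b2 : Int) : Int :=
  pvConv _str.toList

-- ===== PRECONDITION & SPEC =====
def Spec_base1to2 (_str : String) (b1 : Int) (b2 : Int) (out : Int) : Prop := out = base1to2_alt _str b1 b2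
instance (_str : String) (b1 : Int) (b2 : Int) (out : Int) : Decidable (Spec_base1to2 _str b1 b2 out) := by unfold Spec_base1to2; infer_instance

-- ===== CLAIM =====
def Claim_equal_base1to2 : Prop := ∀ (_str : String) (b1 : Int) (b2 : Int), Dom_base1to2 _str b1 b2 → Spec_base1to2 _str b1 b2 (base1to2 _str b1 b2)

-- ===== LEMMAS AND PROOFS =====

def pvFA : Int → Char → Int := fun out val =>
  let out := out * 10
  if 48 ≤ (val.toNat : Int) ∧ (val.toNat : Int) ≤ 57 then
    out + ((val.toNat : Int) - 48)
  else
    out + (10 + ((val.toNat : Int) - 65 + 1))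

theorem pvFA_eq (a : Int) (c : Char) : pvFA a c = a * 10 + pvValue c := by
  unfold pvFA pvValue; split_ifs <;> ring

theorem pvShift (l : List Char) : ∀ a : Int,
    l.foldl pvFA a = a * 10 ^ l.length + l.foldl pvFA 0 := by
  induction l with
  | nil => intro a; simp
  | cons c l ih =>
    intro a
    simp only [List.foldl_cons, List.length_cons, pvFA_eq, zero_mul, zero_add]
    rw [ih (a * 10 + pvValue c), ih (pvValue c)]
    ring

theorem pvConv_eq_aux : ∀ (n : Nat) (l : List Char), l.length ≤ n → pvConv l = l.foldl pvFA 0 := by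
  intro n
  induction n with
  | zero =>
    intro l hl
    have hnil : l = [] := by simpa using List.length_eq_zero_iff.mp (Nat.le_zero.mp hl)
    subst hnil
    rw [pvConv]
    simp
  | succ n ih =>
    intro l hl
    rw [pvConv]
    by_cases h : l.length ≤ 1
    · rw [dif_pos h]
      cases l with
      | nil => simp
      | cons c t =>
        have ht : t = [] := by
          have h0 : t.length = 0 := by simp only [List.length_cons] at h; omega
          exact List.length_eq_zero_iff.mp h0
        subst ht
        simp [pvFA_eq]
    · rw [dif_neg h]
      rw [ih (l.take (l.length / 2)) (by simp only [List.length_take]; omega)]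
      rw [ih (l.drop (l.length / 2)) (by simp only [List.length_drop]; omega)]
      conv_rhs => rw [← List.take_append_drop (l.length / 2) l, List.foldl_append,
        pvShift (l.drop (l.length / 2)) (List.foldl pvFA 0 (l.take (l.length / 2)))]
      simp only [List.length_drop]

theorem pvConv_eq (l : List Char) : pvConv l = l.foldl pvFA 0 :=
  pvConv_eq_aux l.length l le_rfl

-- ===== VERDICT =====
theorem base1to2_spec : Claim_equal_base1to2 := by
  intro s b1 b2 _
  show base1to2 s b1 b2 = base1to2_alt s b1 b2
  unfold base1to2 base1to2_alt
  exact (pvConv_eq s.toList).symm
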